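-- pv_equiv track=rewrite | github.com/agentculture/irc-lens | src/irc_lens/irc/message.py | _parse_tag_block
-- ===== SOURCE A (Python) =====
-- _TAG_UNESCAPE = {
--     "\\:": ";",
--     "\\s": " ",
--     "\\\\": "\\",
--     "\\r": "\r",
--     "\\n": "\n",
-- }
--
-- def _unescape_tag_value(value: str) -> str:
--     out = []
--     i = 0
--     while i < len(value):
--         if value[i] == "\\" and i + 1 < len(value):
--             two = value[i : i + 2]
--             # Per IRCv3 spec, unknown escapes drop the backslash (yield only
--             # the second char). Known escapes map to their defined character.
--             out.append(_TAG_UNESCAPE.get(two, value[i + 1]))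
--             i += 2
--             continue
--         out.append(value[i])
--         i += 1
--     return "".join(out)
--
-- def _parse_tag_block(line: str) -> "tuple[dict[str, str], str]":
--     """Extract leading @tag block from a wire line.
--
--     Returns (tags_dict, remaining_line). If no tag block, returns ({}, line).
--     """
--     if not line.startswith("@"):
--         return {}, line
--     if " " not in line:
--         return {}, ""  # malformed — no command after tags
--     tag_blob, rest = line[1:].split(" ", 1)
--     tags: dict[str, str] = {}
--     for piece in tag_blob.split(";"):
--         if not piece:
--             continue
--         if "=" in piece:
--             key, value = piece.split("=", 1)
--             tags[key] = _unescape_tag_value(value)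
--         else:
--             tags[piece] = ""
--     return tags, rest
-- ===== SOURCE B (Python) =====
-- _TAG_UNESCAPE_CHAR = {":": ";", "s": " ", "\\": "\\", "r": "\r", "n": "\n"}
--
--
-- def _unescape_tag_value(value: str) -> str:
--     out = []
--     pending = False
--     for ch in value:
--         if pending:
--             out.append(_TAG_UNESCAPE_CHAR.get(ch, ch))
--             pending = False
--         elif ch == "\\":
--             pending = True
--         else:
--             out.append(ch)
--     if pending:  # trailing lone backslash is kept as-is
--         out.append("\\")
--     return "".join(out)
--
--
-- def _parse_tag_block(line: str) -> "tuple[dict[str, str], str]":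
--     if not line.startswith("@"):
--         return {}, line
--     blob, sep, rest = line[1:].partition(" ")
--     if not sep:
--         return {}, ""  # malformed — no command after tags
--     tags: dict[str, str] = {}
--     for piece in blob.split(";"):
--         if piece:
--             key, eq, value = piece.partition("=")
--             tags[key] = _unescape_tag_value(value) if eq else ""
--     return tags, rest
-- ===== Notes on version B (the rewrite author's own statement) =====
-- stated objective: idiomatic
-- what changed: The manual index-advancing two-char unescape scan over a two-char string-keyed dict is replaced by a single pending-backslash state-machine pass over the characters with a char-keyed map, and the membership-test-plus-split plumbing is replaced by str.partition for both the space separator and the key/value separator.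
import Mathlib
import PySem

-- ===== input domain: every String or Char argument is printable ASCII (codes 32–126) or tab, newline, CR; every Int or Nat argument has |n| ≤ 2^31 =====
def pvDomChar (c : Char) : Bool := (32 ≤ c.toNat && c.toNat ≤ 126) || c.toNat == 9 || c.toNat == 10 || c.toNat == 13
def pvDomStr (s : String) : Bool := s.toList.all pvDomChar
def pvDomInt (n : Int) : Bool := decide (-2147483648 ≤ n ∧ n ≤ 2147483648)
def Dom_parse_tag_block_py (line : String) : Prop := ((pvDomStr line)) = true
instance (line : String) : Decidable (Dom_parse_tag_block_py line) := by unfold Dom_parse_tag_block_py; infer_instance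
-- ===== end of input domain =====

-- B replaces A's index-advancing two-char unescape scan by a pending-backslash state-machine fold
-- with a char-keyed map, and the membership-test-plus-split plumbing by str.partition (idiomatic; same cost).

-- ===== PORT A =====
-- the module-level _TAG_UNESCAPE dict (strings represented as char lists)
def tagUnescapeDict : PySem.Dict (List Char) (List Char) :=
  PySem.Dict.mk [(['\\', ':'], [';']), (['\\', 's'], [' ']), (['\\', '\\'], ['\\']),
                 (['\\', 'r'], ['\r']), (['\\', 'n'], ['\n'])]

-- _unescape_tag_value: while loop over index i, consuming two chars after a backslash
def unescA : List Char → List Char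
  | [] => []
  | [c] => [c]
  | c :: d :: rest =>
    if c = '\\' then tagUnescapeDict.getD [c, d] [d] ++ unescA rest
    else c :: unescA (d :: rest)

def parse_tag_block_py (line : String) : (List (String × String)) × String :=
  let cs := line.toList
  if !PySem.Chars.startswith cs ['@'] then ([], line)
  else if !PySem.Chars.isIn [' '] cs then ([], "")
  else
    let parts := (PySem.Chars.splitMax? (cs.drop 1) [' '] 1).getD []
    let tag_blob := parts.headD []
    let rest := (parts.drop 1).headD []
    let tags := ((PySem.Chars.split? tag_blob [';']).getD []).foldl
      (fun (d : PySem.Dict String String) piece =>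
        if piece.isEmpty then d
        else if PySem.Chars.isIn ['='] piece then
          let kv := (PySem.Chars.splitMax? piece ['='] 1).getD []
          d.insert (String.ofList (kv.headD [])) (String.ofList (unescA ((kv.drop 1).headD [])))
        else d.insert (String.ofList piece) "") PySem.Dict.empty
    (tags.items, String.ofList rest)

-- ===== PORT B =====
-- the module-level _TAG_UNESCAPE_CHAR dict
def tagUnescapeChar : PySem.Dict Char Char :=
  PySem.Dict.mk [(':', ';'), ('s', ' '), ('\\', '\\'), ('r', '\r'), ('n', '\n')]

-- hand port of str.partition(sep) for a single-char sep via find (exact: Python's partition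
-- splits at the first occurrence of sep, and here len(sep) = 1)
def partitionChar (cs : List Char) (c : Char) : List Char × Bool × List Char :=
  let k := PySem.Chars.find cs [c]
  if k = -1 then (cs, false, [])
  else (cs.take k.toNat, true, cs.drop (k.toNat + 1))

-- _unescape_tag_value (B): one pass with a pending-backslash flag (loop body as a named step)
def unescBStep (st : List Char × Bool) (ch : Char) : List Char × Bool :=
  if st.2 then (st.1 ++ [tagUnescapeChar.getD ch ch], false)
  else if ch = '\\' then (st.1, true)
  else (st.1 ++ [ch], false)

def unescB (cs : List Char) : List Char :=
  let st := cs.foldl unescBStep ([], false)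
  if st.2 then st.1 ++ ['\\'] else st.1

def parse_tag_block_py_alt (line : String) : (List (String × String)) × String :=
  let cs := line.toList
  if !PySem.Chars.startswith cs ['@'] then ([], line)
  else
    let p := partitionChar (cs.drop 1) ' '
    if !p.2.1 then ([], "")
    else
      let tags := ((PySem.Chars.split? p.1 [';']).getD []).foldl
        (fun (d : PySem.Dict String String) piece =>
          if piece.isEmpty then d
          else
            let q := partitionChar piece '='
            d.insert (String.ofList q.1) (if q.2.1 then String.ofList (unescB q.2.2) else "")) PySem.Dict.empty
      (tags.items, String.ofList p.2.2)

-- ===== PRECONDITION & SPEC =====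
def Spec_parse_tag_block_py (line : String) (out : (List (String × String)) × String) : Prop := out = parse_tag_block_py_alt line
instance (line : String) (out : (List (String × String)) × String) : Decidable (Spec_parse_tag_block_py line out) := by unfold Spec_parse_tag_block_py; infer_instance

-- ===== CLAIM (what is proved, stated in full; the proofs are below) =====
def Claim_equal_parse_tag_block_py : Prop := ∀ (line : String), Dom_parse_tag_block_py line → Spec_parse_tag_block_py line (parse_tag_block_py line)

-- ===== LEMMAS AND PROOFS =====

lemma find_go_singleton (c : Char) : ∀ (l : List Char) (k : ℕ),
    PySem.Chars.find.go [c] l k = if c ∈ l then ((k + l.idxOf c : ℕ) : ℤ) else -1 := by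
  intro l
  induction l with
  | nil => intro k; simp [PySem.Chars.find.go]
  | cons h t ih =>
    intro k
    by_cases hc : c = h
    · subst hc; simp [PySem.Chars.find.go, List.isPrefixOf]
    · simp [PySem.Chars.find.go, List.isPrefixOf, hc, ih, Ne.symm hc, List.mem_cons]
      split_ifs with hm
      · ring_nf
      · rfl

lemma find_singleton (c : Char) (l : List Char) :
    PySem.Chars.find l [c] = if c ∈ l then ((l.idxOf c : ℕ) : ℤ) else -1 := by
  simp [PySem.Chars.find, find_go_singleton]

lemma splitOnMax_go_zero (sep : List Char) : ∀ (fuel : ℕ) (l cur : List Char) (acc : List (List Char)),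
    PySem.Chars.splitOnMax.go sep fuel 0 l cur acc = ((cur.reverse ++ l) :: acc).reverse := by
  intro fuel l cur acc
  cases fuel with
  | zero => simp [PySem.Chars.splitOnMax.go]
  | succ f => cases l <;> simp [PySem.Chars.splitOnMax.go]

lemma splitOnMax_go_one_singleton (c : Char) : ∀ (l : List Char) (fuel : ℕ),
    l.length ≤ fuel → ∀ (cur : List Char) (acc : List (List Char)),
    PySem.Chars.splitOnMax.go [c] fuel 1 l cur acc =
      if c ∈ l then acc.reverse ++ [cur.reverse ++ l.take (l.idxOf c), l.drop (l.idxOf c + 1)]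
      else acc.reverse ++ [cur.reverse ++ l] := by
  intro l
  induction l with
  | nil =>
    intro fuel _ cur acc
    cases fuel <;> simp [PySem.Chars.splitOnMax.go]
  | cons h t ih =>
    intro fuel hfuel cur acc
    cases fuel with
    | zero => simp at hfuel
    | succ f =>
      by_cases hc : c = h
      · subst hc
        simp [PySem.Chars.splitOnMax.go, List.isPrefixOf, splitOnMax_go_zero]
      · have ht : t.length ≤ f := by simpa using hfuel
        have hpre : [c].isPrefixOf (h :: t) = false := by
          simp [List.isPrefixOf, hc]
        rw [show PySem.Chars.splitOnMax.go [c] (f + 1) 1 (h :: t) cur acc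
            = PySem.Chars.splitOnMax.go [c] f 1 t (h :: cur) acc from by
          simp [PySem.Chars.splitOnMax.go, hpre]]
        rw [ih f ht (h :: cur) acc]
        by_cases hm : c ∈ t
        · simp [hm, hc, Ne.symm hc]
        · simp [hm, hc]

lemma splitMax1_singleton (l : List Char) (c : Char) :
    (PySem.Chars.splitMax? l [c] 1).getD [] =
      if c ∈ l then [l.take (l.idxOf c), l.drop (l.idxOf c + 1)] else [l] := by
  have hgo := splitOnMax_go_one_singleton c l (l.length + 1) (by omega) [] []
  simp only [PySem.Chars.splitMax?, PySem.Chars.splitOnMax, List.isEmpty_cons,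
    Bool.false_eq_true, if_false, Option.getD_some]
  rw [if_neg (by norm_num : ¬ (1 : ℤ) < 0), Int.toNat_one, hgo]
  split_ifs <;> simp

lemma tagdict_char (d : Char) :
    tagUnescapeDict.getD ['\\', d] [d] = [tagUnescapeChar.getD d d] := by
  by_cases h1 : d = ':'; · subst h1; decide
  by_cases h2 : d = 's'; · subst h2; decide
  by_cases h3 : d = '\\'; · subst h3; decide
  by_cases h4 : d = 'r'; · subst h4; decide
  by_cases h5 : d = 'n'; · subst h5; decide
  simp [tagUnescapeDict, tagUnescapeChar, PySem.Dict.getD, PySem.Dict.get?,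
    List.cons_beq_cons, Ne.symm h1, Ne.symm h2, Ne.symm h3, Ne.symm h4, Ne.symm h5]

lemma unescB_go (l : List Char) : ∀ (out : List Char),
    (if (l.foldl unescBStep (out, false)).2 then (l.foldl unescBStep (out, false)).1 ++ ['\\']
     else (l.foldl unescBStep (out, false)).1) = out ++ unescA l := by
  induction l using unescA.induct with
  | case1 => intro out; simp [unescA]
  | case2 c =>
    intro out
    by_cases hc : c = '\\'
    · subst hc; simp [unescA, unescBStep]
    · simp [unescA, unescBStep, hc]
  | case3 d rest ih =>
    intro out
    rw [List.foldl_cons, show unescBStep (out, false) '\\' = (out, true) from by simp [unescBStep]]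
    rw [List.foldl_cons, show unescBStep (out, true) d
        = (out ++ [tagUnescapeChar.getD d d], false) from by simp [unescBStep]]
    rw [ih (out ++ [tagUnescapeChar.getD d d])]
    simp [unescA, tagdict_char]
  | case4 c d rest hc ih =>
    intro out
    rw [List.foldl_cons, show unescBStep (out, false) c = (out ++ [c], false) from by
      simp [unescBStep, hc]]
    rw [ih (out ++ [c])]
    simp [unescA, hc]

lemma unescB_eq_unescA (l : List Char) : unescB l = unescA l := by
  simpa [unescB] using unescB_go l []

lemma step_eq :
    (fun (d : PySem.Dict String String) (piece : List Char) =>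
      if piece.isEmpty then d
      else if PySem.Chars.isIn ['='] piece then
        let kv := (PySem.Chars.splitMax? piece ['='] 1).getD []
        d.insert (String.ofList (kv.headD [])) (String.ofList (unescA ((kv.drop 1).headD [])))
      else d.insert (String.ofList piece) "")
    = (fun (d : PySem.Dict String String) (piece : List Char) =>
      if piece.isEmpty then d
      else
        let q := partitionChar piece '='
        d.insert (String.ofList q.1) (if q.2.1 then String.ofList (unescB q.2.2) else "")) := by
  funext d piece
  by_cases hp : piece.isEmpty
  · simp [hp]
  · simp only [hp, Bool.false_eq_true, if_false]
    by_cases hm : '=' ∈ piece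
    · have hin : PySem.Chars.isIn ['='] piece = true := by
        simp [PySem.Chars.isIn, find_singleton, hm]
      have hk : PySem.Chars.find piece ['='] = ((piece.idxOf '=' : ℕ) : ℤ) := by
        simp [find_singleton, hm]
      simp only [hin, if_true, partitionChar, hk, splitMax1_singleton, if_pos hm]
      rw [if_neg (by omega : ¬ ((piece.idxOf '=' : ℕ) : ℤ) = -1)]
      simp [unescB_eq_unescA]
    · have hin : PySem.Chars.isIn ['='] piece = false := by
        simp [PySem.Chars.isIn, find_singleton, hm]
      have hk : PySem.Chars.find piece ['='] = -1 := by
        simp [find_singleton, hm]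
      simp only [hin, partitionChar, hk]
      simp

-- ===== VERDICT (by name: the statement is the Claim_ definition above) =====
theorem parse_tag_block_py_spec : Claim_equal_parse_tag_block_py := by
  intro line _
  unfold Spec_parse_tag_block_py parse_tag_block_py parse_tag_block_py_alt
  cases hcs : line.toList with
  | nil => simp [PySem.Chars.startswith]
  | cons h t =>
    by_cases hh : h = '@'
    · subst hh
      have hsw : PySem.Chars.startswith ('@' :: t) ['@'] = true := by
        simp [PySem.Chars.startswith, List.isPrefixOf]
      simp only [hsw, Bool.not_true, Bool.false_eq_true, if_false, List.drop_succ_cons,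
        List.drop_zero]
      by_cases hsp : ' ' ∈ t
      · have hin : PySem.Chars.isIn [' '] ('@' :: t) = true := by
          simp only [PySem.Chars.isIn, find_singleton, List.mem_cons, hsp, or_true, if_true,
            bne_iff_ne, ne_eq]
          generalize List.idxOf ' ' ('@' :: t) = n
          omega
        have hk : PySem.Chars.find t [' '] = ((t.idxOf ' ' : ℕ) : ℤ) := by
          simp [find_singleton, hsp]
        rw [step_eq]
        simp only [hin, Bool.not_true, Bool.false_eq_true, if_false, partitionChar, hk,
          splitMax1_singleton, if_pos hsp]
        rw [if_neg (by omega : ¬ ((t.idxOf ' ' : ℕ) : ℤ) = -1)]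
        simp
      · have hin : PySem.Chars.isIn [' '] ('@' :: t) = false := by
          simp [PySem.Chars.isIn, find_singleton, List.mem_cons, hsp]
        have hk : PySem.Chars.find t [' '] = -1 := by
          simp [find_singleton, hsp]
        simp only [hin, partitionChar, hk]
        simp
    · have hsw : PySem.Chars.startswith (h :: t) ['@'] = false := by
        simp only [PySem.Chars.startswith, List.isPrefixOf, Bool.and_true,
          beq_eq_false_iff_ne, ne_eq]
        exact fun e => hh e.symm
      simp [hsw]
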